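-- pv_equiv track=rewrite | github.com/nico-koltermann/LitCEoH | src/problems/multibay_reshuffeling/mr_util/search_move_sequence.py | construct_dependency_graph
-- ===== SOURCE A (Python) =====
-- def construct_dependency_graph(moves, item_groups):
--     """
--     Creates a dictionary where move index points to a list
--     of other moves indices that it depends on.
--     """
--     depends_on = {i: [] for i in range(len(moves))}
--     for i in range(len(moves)):
--         from_lane = moves[i][0]
--         to_lane = moves[i][1]
--         for j in range(i + 1, len(moves)):
--             if from_lane == moves[j][0]:
--                 if item_groups[i] == item_groups[j]:
--                     continue
--                 else:
--                     depends_on[j].append(i)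
--                     break
--             elif from_lane == moves[j][1]:
--                 depends_on[j].append(i)
--                 break
--         for j in range(i + 1, len(moves)):
--             if to_lane == moves[j][1]:
--                 if item_groups[i] == item_groups[j]:
--                     continue
--                 else:
--                     depends_on[j].append(i)
--                     break
--             elif to_lane == moves[j][0]:
--                 depends_on[j].append(i)
--                 break
--
--     return depends_on
-- ===== SOURCE B (Python) =====
-- def _query(s, g):
--     """First conflicting later move for a lane summary s and querying group g."""
--     if s is None:
--         return None
--     j0, prim, g0, alt = s
--     if prim and g0 == g:
--         return alt
--     return j0
--
--
-- def construct_dependency_graph(moves, item_groups):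
--     """
--     Creates a dictionary where move index points to a list
--     of other moves indices that it depends on.
--
--     Single backward pass keeping, per lane, a constant-size summary of the
--     first later conflict (O(n) instead of the quadratic forward rescans).
--     """
--     n = len(moves)
--     ans = [None] * n
--     view1 = {}  # lane -> (index, is_from_occurrence, group, jump_target)
--     view2 = {}  # lane -> (index, is_to_occurrence, group, jump_target)
--     for i in range(n - 1, -1, -1):
--         f, t = moves[i][0], moves[i][1]
--         g = item_groups[i]
--         ans[i] = (_query(view1.get(f), g), _query(view2.get(t), g))
--         view1[f] = (i, True, g, _query(view1.get(f), g))
--         if t != f: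
--             view1[t] = (i, False, g, None)
--         view2[t] = (i, True, g, _query(view2.get(t), g))
--         if f != t:
--             view2[f] = (i, False, g, None)
--     depends_on = {i: [] for i in range(n)}
--     for i in range(n):
--         a1, a2 = ans[i]
--         if a1 is not None:
--             depends_on[a1].append(i)
--         if a2 is not None:
--             depends_on[a2].append(i)
--     return depends_on
-- ===== Notes on version B (the rewrite author's own statement) =====
-- stated objective: faster
-- what changed: Replaced A's per-move quadratic forward rescans of the remaining moves by a single backward pass that keeps, per lane and per scan role, a constant-size summary (first later occurrence plus a jump target past its equal-group run) from which each move's first conflict is read in O(1), followed by one forward pass assembling the dependency lists.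
-- outside the precondition, e.g. on construct_dependency_graph([(2, 9), (-1, -1)], []): A returns {0: [], 1: []}, B raises IndexError
import Mathlib
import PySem

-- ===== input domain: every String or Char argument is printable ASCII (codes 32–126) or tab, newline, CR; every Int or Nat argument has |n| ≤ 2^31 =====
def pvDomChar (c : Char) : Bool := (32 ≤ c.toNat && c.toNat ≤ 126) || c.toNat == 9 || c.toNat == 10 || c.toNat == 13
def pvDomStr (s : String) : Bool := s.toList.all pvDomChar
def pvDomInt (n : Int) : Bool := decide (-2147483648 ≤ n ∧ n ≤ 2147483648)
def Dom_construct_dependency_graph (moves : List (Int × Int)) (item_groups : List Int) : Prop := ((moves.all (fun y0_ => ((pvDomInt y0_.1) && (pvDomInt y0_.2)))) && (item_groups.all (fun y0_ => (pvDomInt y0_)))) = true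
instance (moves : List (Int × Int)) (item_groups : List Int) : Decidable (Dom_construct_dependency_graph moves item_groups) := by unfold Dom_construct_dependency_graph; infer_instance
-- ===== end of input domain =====

-- B replaces A's quadratic forward rescans by one backward pass keeping a per-lane
-- constant-size summary of the first later conflict (objective: faster).

-- ===== PORT A =====
-- first inner loop of A: scan j = i+1 … n-1 for a conflict with from_lane, appending on break
def loop1A (moves : List (Int × Int)) (groups : List Int) (i : Nat) (fl gi : Int)
    (d : PySem.Dict Int (List Int)) (j : Nat) : PySem.Dict Int (List Int) :=
  if h : j < moves.length then
    if fl == (moves.getD j (0, 0)).1 then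
      if gi == groups.getD j 0 then loop1A moves groups i fl gi d (j + 1)
      else d.modify (Int.ofNat j) [] (· ++ [Int.ofNat i])
    else if fl == (moves.getD j (0, 0)).2 then d.modify (Int.ofNat j) [] (· ++ [Int.ofNat i])
    else loop1A moves groups i fl gi d (j + 1)
  else d
termination_by moves.length - j

-- second inner loop of A: same scan with to_lane, roles of the pair swapped
def loop2A (moves : List (Int × Int)) (groups : List Int) (i : Nat) (tl gi : Int)
    (d : PySem.Dict Int (List Int)) (j : Nat) : PySem.Dict Int (List Int) :=
  if h : j < moves.length then
    if tl == (moves.getD j (0, 0)).2 then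
      if gi == groups.getD j 0 then loop2A moves groups i tl gi d (j + 1)
      else d.modify (Int.ofNat j) [] (· ++ [Int.ofNat i])
    else if tl == (moves.getD j (0, 0)).1 then d.modify (Int.ofNat j) [] (· ++ [Int.ofNat i])
    else loop2A moves groups i tl gi d (j + 1)
  else d
termination_by moves.length - j

def construct_dependency_graph (moves : List (Int × Int)) (item_groups : List Int) : List (Int × List Int) :=
  let n := moves.length
  let d0 : PySem.Dict Int (List Int) :=
    (List.range n).foldl (fun d i => d.insert (Int.ofNat i) []) PySem.Dict.empty
  let d := (List.range n).foldl (fun d i =>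
    let mi := moves.getD i (0, 0)
    let gi := item_groups.getD i 0
    let d := loop1A moves item_groups i mi.1 gi d (i + 1)
    loop2A moves item_groups i mi.2 gi d (i + 1)) d0
  d.items

-- ===== PORT B =====
-- lane summary: (index of first later occurrence, is it a primary-role occurrence,
--                its group, target after skipping the equal-group primary run)
def pvQueryB (s : Option (Nat × Bool × Int × Option Nat)) (g : Int) : Option Nat :=
  match s with
  | none => none
  | some (j0, prim, g0, alt) => if prim && (g0 == g) then alt else some j0

-- backward pass: state after consuming the last k moves (view1, view2, answer list)
def backB (moves : List (Int × Int)) (groups : List Int) :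
    Nat → PySem.Dict Int (Nat × Bool × Int × Option Nat) ×
          PySem.Dict Int (Nat × Bool × Int × Option Nat) ×
          List (Option Nat × Option Nat)
  | 0 => (PySem.Dict.empty, PySem.Dict.empty, [])
  | k + 1 =>
    let st := backB moves groups k
    let d1 := st.1
    let d2 := st.2.1
    let i := moves.length - (k + 1)
    let m := moves.getD i (0, 0)
    let g := groups.getD i 0
    let a1 := pvQueryB (d1.get? m.1) g
    let a2 := pvQueryB (d2.get? m.2) g
    let d1' := d1.insert m.1 (i, true, g, pvQueryB (d1.get? m.1) g)
    let d1'' := if m.2 == m.1 then d1' else d1'.insert m.2 (i, false, g, none)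
    let d2' := d2.insert m.2 (i, true, g, pvQueryB (d2.get? m.2) g)
    let d2'' := if m.1 == m.2 then d2' else d2'.insert m.1 (i, false, g, none)
    (d1'', d2'', (a1, a2) :: st.2.2)

def construct_dependency_graph_alt (moves : List (Int × Int)) (item_groups : List Int) : List (Int × List Int) :=
  let n := moves.length
  let ans := (backB moves item_groups n).2.2
  let d0 : PySem.Dict Int (List Int) :=
    (List.range n).foldl (fun d i => d.insert (Int.ofNat i) []) PySem.Dict.empty
  let d := (List.range n).foldl (fun d i =>
    let a := ans.getD i (none, none)
    let d := match a.1 with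
      | some j => d.modify (Int.ofNat j) [] (· ++ [Int.ofNat i])
      | none => d
    match a.2 with
      | some j => d.modify (Int.ofNat j) [] (· ++ [Int.ofNat i])
      | none => d) d0
  d.items

-- ===== PRECONDITION & SPEC =====
-- Pre_ requires item_groups to cover all moves. A reads item_groups only lazily inside a
-- lane-match branch and so happens to return on some shorter item_groups inputs without
-- lane matches; B's backward pass reads every move's group eagerly and raises IndexError there.
def Pre_construct_dependency_graph (moves : List (Int × Int)) (item_groups : List Int) : Prop :=
  moves.length ≤ item_groups.length
instance (moves : List (Int × Int)) (item_groups : List Int) : Decidable (Pre_construct_dependency_graph moves item_groups) := by unfold Pre_construct_dependency_graph; infer_instance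

def pvWitness_construct_dependency_graph : (List (Int × Int)) × List Int := ([(0, 1), (1, 2)], [0, 1])

def Spec_construct_dependency_graph (moves : List (Int × Int)) (item_groups : List Int) (out : List (Int × List Int)) : Prop := out = construct_dependency_graph_alt moves item_groups
instance (moves : List (Int × Int)) (item_groups : List Int) (out : List (Int × List Int)) : Decidable (Spec_construct_dependency_graph moves item_groups out) := by unfold Spec_construct_dependency_graph; infer_instance

-- ===== CLAIM (what is proved, stated in full; the proofs are below) =====
def Claim_equal_construct_dependency_graph : Prop := ∀ (moves : List (Int × Int)) (item_groups : List Int), Dom_construct_dependency_graph moves item_groups → Pre_construct_dependency_graph moves item_groups → Spec_construct_dependency_graph moves item_groups (construct_dependency_graph moves item_groups)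

-- ===== LEMMAS AND PROOFS =====

-- option-valued version of A's first inner loop: the index it breaks at, if any
def scan1 (moves : List (Int × Int)) (groups : List Int) (fl g : Int) (j : Nat) : Option Nat :=
  if h : j < moves.length then
    if fl == (moves.getD j (0, 0)).1 then
      if g == groups.getD j 0 then scan1 moves groups fl g (j + 1) else some j
    else if fl == (moves.getD j (0, 0)).2 then some j
    else scan1 moves groups fl g (j + 1)
  else none
termination_by moves.length - j

def scan2 (moves : List (Int × Int)) (groups : List Int) (tl g : Int) (j : Nat) : Option Nat :=
  if h : j < moves.length then
    if tl == (moves.getD j (0, 0)).2 then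
      if g == groups.getD j 0 then scan2 moves groups tl g (j + 1) else some j
    else if tl == (moves.getD j (0, 0)).1 then some j
    else scan2 moves groups tl g (j + 1)
  else none
termination_by moves.length - j

def appOpt (d : PySem.Dict Int (List Int)) (i : Nat) (o : Option Nat) : PySem.Dict Int (List Int) :=
  match o with
  | some j => d.modify (Int.ofNat j) [] (· ++ [Int.ofNat i])
  | none => d

lemma scan1_stop (moves : List (Int × Int)) (groups : List Int) (fl g : Int) (j : Nat)
    (h : moves.length ≤ j) : scan1 moves groups fl g j = none := by
  rw [scan1, dif_neg (by omega)]

lemma scan2_stop (moves : List (Int × Int)) (groups : List Int) (tl g : Int) (j : Nat)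
    (h : moves.length ≤ j) : scan2 moves groups tl g j = none := by
  rw [scan2, dif_neg (by omega)]

lemma loop1A_eq_appOpt (moves : List (Int × Int)) (groups : List Int) (i : Nat) (fl gi : Int)
    (d : PySem.Dict Int (List Int)) (j : Nat) :
    loop1A moves groups i fl gi d j = appOpt d i (scan1 moves groups fl gi j) := by
  fun_induction loop1A with
  | case5 j h => rw [scan1, dif_neg (by omega)]; rfl
  | _ => rw [scan1] <;> simp_all [appOpt]

lemma loop2A_eq_appOpt (moves : List (Int × Int)) (groups : List Int) (i : Nat) (tl gi : Int)
    (d : PySem.Dict Int (List Int)) (j : Nat) :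
    loop2A moves groups i tl gi d j = appOpt d i (scan2 moves groups tl gi j) := by
  fun_induction loop2A with
  | case5 j h => rw [scan2, dif_neg (by omega)]; rfl
  | _ => rw [scan2] <;> simp_all [appOpt]

-- the specified contents of B's answer list
def ansSpec (moves : List (Int × Int)) (groups : List Int) (i : Nat) : Option Nat × Option Nat :=
  (scan1 moves groups (moves.getD i (0, 0)).1 (groups.getD i 0) (i + 1),
   scan2 moves groups (moves.getD i (0, 0)).2 (groups.getD i 0) (i + 1))

-- invariant of the backward pass: after consuming the last k moves, querying a lane
-- summary answers exactly A's forward scan from index n - k, and the answers so far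
-- are the specified ones
lemma backB_inv (moves : List (Int × Int)) (groups : List Int) (k : Nat) (hk : k ≤ moves.length) :
    (∀ L g, pvQueryB (((backB moves groups k).1).get? L) g = scan1 moves groups L g (moves.length - k)) ∧
    (∀ L g, pvQueryB (((backB moves groups k).2.1).get? L) g = scan2 moves groups L g (moves.length - k)) ∧
    (backB moves groups k).2.2 = (List.range' (moves.length - k) k).map (ansSpec moves groups) := by
  induction k with
  | zero =>
    refine ⟨fun L g => ?_, fun L g => ?_, rfl⟩ <;>
      simp [backB, pvQueryB, scan1_stop, scan2_stop]
  | succ k ih =>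
    obtain ⟨ih1, ih2, ih3⟩ := ih (by omega)
    have hi : moves.length - (k + 1) < moves.length := by omega
    have hni : moves.length - k = moves.length - (k + 1) + 1 := by omega
    -- one step of the backward pass preserves the query invariant for view1
    have hu1 : ∀ L g, pvQueryB (((backB moves groups (k+1)).1).get? L) g =
        scan1 moves groups L g (moves.length - (k + 1)) := by
      intro L g'
      simp only [backB]
      rw [scan1, dif_pos hi]
      simp only [List.getD_eq_getElem?_getD]
      set i := moves.length - (k + 1) with hidef
      set m := moves[i]?.getD (0, 0) with hm
      set g := groups[i]?.getD 0 with hg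
      set d1 := (backB moves groups k).1 with hd1
      have hQ : ∀ gq, pvQueryB (d1.get? m.1) gq = scan1 moves groups m.1 gq (i + 1) := by
        intro gq; rw [← hni]
        simpa only [List.getD_eq_getElem?_getD] using ih1 m.1 gq
      have hR : ∀ gq, pvQueryB (d1.get? L) gq = scan1 moves groups L gq (i + 1) := by
        intro gq; rw [← hni]
        simpa only [List.getD_eq_getElem?_getD] using ih1 L gq
      by_cases hLf : L = m.1
      · have hget : ((if m.2 == m.1 then
              d1.insert m.1 (i, true, g, pvQueryB (d1.get? m.1) g)
            else
              (d1.insert m.1 (i, true, g, pvQueryB (d1.get? m.1) g)).insert m.2 (i, false, g, none)).get? L)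
            = some (i, true, g, pvQueryB (d1.get? m.1) g) := by
          by_cases htf : m.2 = m.1
          · simp [htf, hLf, PySem.Dict.get?_insert, beq_iff_eq]
          · simp [htf, hLf, PySem.Dict.get?_insert, beq_iff_eq,
              (show ¬ m.1 = m.2 from fun h => htf h.symm)]
        rw [hget, hQ]
        by_cases hgg : g' = g
        · simp [pvQueryB, hLf, hgg]
        · simp [pvQueryB, hLf, hgg, (show ¬ g = g' from fun h => hgg h.symm)]
      · by_cases hLt : L = m.2
        · have htf : ¬ m.2 = m.1 := fun h => hLf (hLt.trans h)
          have hget : ((if m.2 == m.1 then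
                d1.insert m.1 (i, true, g, pvQueryB (d1.get? m.1) g)
              else
                (d1.insert m.1 (i, true, g, pvQueryB (d1.get? m.1) g)).insert m.2 (i, false, g, none)).get? L)
              = some (i, false, g, none) := by
            simp [htf, hLt, PySem.Dict.get?_insert, beq_iff_eq]
          rw [hget]
          simp [pvQueryB, hLt, htf, beq_iff_eq]
        · have hget : ((if m.2 == m.1 then
                d1.insert m.1 (i, true, g, pvQueryB (d1.get? m.1) g)
              else
                (d1.insert m.1 (i, true, g, pvQueryB (d1.get? m.1) g)).insert m.2 (i, false, g, none)).get? L)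
              = d1.get? L := by
            by_cases htf : m.2 = m.1 <;>
              simp [htf, hLf, hLt, PySem.Dict.get?_insert, beq_iff_eq]
          rw [hget, hR]
          simp [hLf, hLt]
    have hu2 : ∀ L g, pvQueryB (((backB moves groups (k+1)).2.1).get? L) g =
        scan2 moves groups L g (moves.length - (k + 1)) := by
      intro L g'
      simp only [backB]
      rw [scan2, dif_pos hi]
      simp only [List.getD_eq_getElem?_getD]
      set i := moves.length - (k + 1) with hidef
      set m := moves[i]?.getD (0, 0) with hm
      set g := groups[i]?.getD 0 with hg
      set d2 := (backB moves groups k).2.1 with hdd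
      have hQ : ∀ gq, pvQueryB (d2.get? m.2) gq = scan2 moves groups m.2 gq (i + 1) := by
        intro gq; rw [← hni]
        simpa only [List.getD_eq_getElem?_getD] using ih2 m.2 gq
      have hR : ∀ gq, pvQueryB (d2.get? L) gq = scan2 moves groups L gq (i + 1) := by
        intro gq; rw [← hni]
        simpa only [List.getD_eq_getElem?_getD] using ih2 L gq
      by_cases hLf : L = m.2
      · have hget : ((if m.1 == m.2 then
              d2.insert m.2 (i, true, g, pvQueryB (d2.get? m.2) g)
            else
              (d2.insert m.2 (i, true, g, pvQueryB (d2.get? m.2) g)).insert m.1 (i, false, g, none)).get? L)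
            = some (i, true, g, pvQueryB (d2.get? m.2) g) := by
          by_cases htf : m.1 = m.2
          · simp [htf, hLf, PySem.Dict.get?_insert, beq_iff_eq]
          · simp [htf, hLf, PySem.Dict.get?_insert, beq_iff_eq,
              (show ¬ m.2 = m.1 from fun h => htf h.symm)]
        rw [hget, hQ]
        by_cases hgg : g' = g
        · simp [pvQueryB, hLf, hgg]
        · simp [pvQueryB, hLf, hgg, (show ¬ g = g' from fun h => hgg h.symm)]
      · by_cases hLt : L = m.1
        · have htf : ¬ m.1 = m.2 := fun h => hLf (hLt.trans h)
          have hget : ((if m.1 == m.2 then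
                d2.insert m.2 (i, true, g, pvQueryB (d2.get? m.2) g)
              else
                (d2.insert m.2 (i, true, g, pvQueryB (d2.get? m.2) g)).insert m.1 (i, false, g, none)).get? L)
              = some (i, false, g, none) := by
            simp [htf, hLt, PySem.Dict.get?_insert, beq_iff_eq]
          rw [hget]
          simp [pvQueryB, hLt, htf, beq_iff_eq]
        · have hget : ((if m.1 == m.2 then
                d2.insert m.2 (i, true, g, pvQueryB (d2.get? m.2) g)
              else
                (d2.insert m.2 (i, true, g, pvQueryB (d2.get? m.2) g)).insert m.1 (i, false, g, none)).get? L)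
              = d2.get? L := by
            by_cases htf : m.1 = m.2 <;>
              simp [htf, hLf, hLt, PySem.Dict.get?_insert, beq_iff_eq]
          rw [hget, hR]
          simp [hLf, hLt]
    have hacc : (backB moves groups (k+1)).2.2 =
        (List.range' (moves.length - (k+1)) (k+1)).map (ansSpec moves groups) := by
      simp only [backB]
      rw [List.range'_succ, List.map_cons, ih3, hni]
      have h1 := ih1 (moves.getD (moves.length - (k+1)) (0,0)).1 (groups.getD (moves.length - (k+1)) 0)
      have h2 := ih2 (moves.getD (moves.length - (k+1)) (0,0)).2 (groups.getD (moves.length - (k+1)) 0)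
      rw [hni] at h1 h2
      simp only [List.getD_eq_getElem?_getD] at h1 h2
      simp [ansSpec, h1, h2]
    exact ⟨hu1, hu2, hacc⟩

-- ===== VERDICT (by name: the statement is the Claim_ definition above) =====
lemma getD_ansList (moves : List (Int × Int)) (groups : List Int) (x : Nat)
    (hx : x < moves.length) :
    ((backB moves groups moves.length).2.2).getD x (none, none) = ansSpec moves groups x := by
  have h := (backB_inv moves groups moves.length le_rfl).2.2
  rw [h, Nat.sub_self, ← List.range_eq_range']
  exact PySem.List.getD_map_range _ _ _ _ hx

theorem construct_dependency_graph_spec : Claim_equal_construct_dependency_graph := by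
  intro moves groups _ _
  unfold Spec_construct_dependency_graph construct_dependency_graph construct_dependency_graph_alt
  refine congrArg PySem.Dict.items ?_
  apply PySem.List.foldl_congr_mem
  intro acc x hx
  have hxn : x < moves.length := List.mem_range.mp hx
  simp only [loop1A_eq_appOpt, loop2A_eq_appOpt, getD_ansList moves groups x hxn]
  rfl
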